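-- pv_equiv track=rewrite | github.com/mbh038/PE | PE_0050/PE_0050.py | primesthatsumto
-- ===== SOURCE A (Python) =====
-- import itertools as it
--
-- def primesthatsumto(n):
--     psum=0
--     count=0
--     for p in erat2a():
--         psum+=p
--         if psum>n:
--             break
--         count+=1
--     return count
--
-- def erat2a():
--     D = {}
--     yield 2
--     for q in it.islice(it.count(3), 0, None, 2):
--         p = D.pop(q, None)
--         if p is None:
--             D[q * q] = 2 * q # use here 2 * q
--             yield q
--         else:
--             x = p + q
--             while x in D:
--                 x += p
--             D[x] = p
-- ===== SOURCE B (Python) =====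
-- def primesthatsumto(n):
--     psum = 2
--     if psum > n:
--         return 0
--     count = 1
--     c = 3
--     while True:
--         if _is_prime_odd(c):
--             psum += c
--             if psum > n:
--                 return count
--             count += 1
--         c += 2
--
-- def _is_prime_odd(c):
--     d = 3
--     while d * d <= c:
--         if c % d == 0:
--             return False
--         d += 2
--     return True
-- ===== Notes on version B (the rewrite author's own statement) =====
-- stated objective: simpler
-- what changed: Replaces the incremental dict-based Sieve-of-Eratosthenes generator (lazy composite bookkeeping in a dict, collision chains) by a plain trial-division primality test of each odd candidate up to its square root, feeding the same accumulate-until-sum-exceeds-n loop.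
import Mathlib
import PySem

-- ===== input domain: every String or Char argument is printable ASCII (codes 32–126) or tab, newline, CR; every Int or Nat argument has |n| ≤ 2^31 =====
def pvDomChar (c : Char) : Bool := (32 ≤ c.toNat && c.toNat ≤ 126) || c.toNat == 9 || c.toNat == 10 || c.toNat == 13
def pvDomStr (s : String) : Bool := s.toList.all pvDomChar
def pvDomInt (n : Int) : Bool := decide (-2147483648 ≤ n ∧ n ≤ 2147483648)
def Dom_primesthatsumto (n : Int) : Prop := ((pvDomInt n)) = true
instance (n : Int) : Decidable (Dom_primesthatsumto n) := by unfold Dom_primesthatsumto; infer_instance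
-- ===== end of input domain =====

-- B replaces A's incremental dict-sieve prime generator by trial division up to √c (objective: simpler).
-- Both ports drive the candidate loop with the same fuel constant (the Python loops are while-True /
-- generator loops; the fuel only makes them structural and is never exhausted for |n| ≤ 2^31).
-- A's sieve dict D is only ever read through membership tests / lookups / pops (never iterated), so it is
-- ported with Std.TreeMap, which is exact for those operations (insertion order is never observed).

-- ===== PORT A =====
def pvFuel : Nat := 8589934592

-- the inner `while x in D: x += p`; fuel D.size+1 is an exact bound (x strictly increases, keys distinct)
def pvSkip : Nat → Std.TreeMap Int Int compare → Int → Int → Int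
  | 0, _, _, x => x
  | f+1, D, p, x => if D.contains x then pvSkip f D p (x + p) else x

-- the fused `for p in erat2a(): psum += p; if psum > n: break; count += 1` loop, from candidate q on;
-- `p = D.pop(q, None); if p is None: … else: …` is the match on D[q]? (the pop's removal happens in the else arm)
def pvLoopA (n : Int) : Nat → Int → Int → Std.TreeMap Int Int compare → Int → Int
  | 0, _, count, _, _ => count
  | f+1, psum, count, D, q =>
    match D[q]? with
    | none =>
      let D' := D.insert (q*q) (2*q)
      let psum' := psum + q
      if psum' > n then count else pvLoopA n f psum' (count+1) D' (q+2)
    | some p =>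
      let D1 := D.erase q
      let x := pvSkip (D1.size + 1) D1 p (p + q)
      pvLoopA n f psum count (D1.insert x p) (q+2)

def primesthatsumto (n : Int) : Int :=
  -- psum=0; first yielded prime is 2
  if 0 + 2 > n then 0 else pvLoopA n pvFuel (0 + 2) (0 + 1) ∅ 3

-- ===== PORT B =====
-- `while d*d <= c: if c % d == 0: return False; d += 2` — terminates since d*d grows past c
def pvTrial (c d : Int) : Bool :=
  if h : d * d ≤ c then
    (if PySem.Int.mod c d = 0 then false else pvTrial c (d + 2))
  else true
termination_by (c + 1 - d).toNat
decreasing_by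
  have h0 : (0:Int) ≤ c := le_trans (mul_self_nonneg d) h
  have h1 : 2 * d ≤ c + 1 := by nlinarith [mul_self_nonneg (d - 1)]
  omega

def pvIsPrimeOdd (c : Int) : Bool := pvTrial c 3

def pvLoopB (n : Int) : Nat → Int → Int → Int → Int
  | 0, _, count, _ => count
  | f+1, psum, count, c =>
    if pvIsPrimeOdd c then
      let psum' := psum + c
      if psum' > n then count else pvLoopB n f psum' (count+1) (c+2)
    else pvLoopB n f psum count (c+2)

def primesthatsumto_alt (n : Int) : Int :=
  if 2 > n then 0 else pvLoopB n pvFuel 2 1 3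

-- ===== PRECONDITION & SPEC =====
def Spec_primesthatsumto (n : Int) (out : Int) : Prop := out = primesthatsumto_alt n
instance (n : Int) (out : Int) : Decidable (Spec_primesthatsumto n out) := by unfold Spec_primesthatsumto; infer_instance

-- ===== CLAIM =====
def Claim_equal_primesthatsumto : Prop := ∀ (n : Int), Dom_primesthatsumto n → Spec_primesthatsumto n (primesthatsumto n)

-- ===== LEMMAS AND PROOFS =====

-- m has a nontrivial odd divisor (for odd m ≥ 3: m is composite)
def pvHasOddDiv (m : Int) : Prop := ∃ d, Odd d ∧ 3 ≤ d ∧ d < m ∧ d ∣ m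

-- the sieve-state invariant, relative to the current odd candidate q
def pvInv (D : Std.TreeMap Int Int compare) (q : Int) : Prop :=
  Odd q ∧ 3 ≤ q ∧
  (∀ k w, D[k]? = some w → ∃ p, w = 2*p ∧ Odd p ∧ 3 ≤ p ∧ p < q ∧ p ∣ k ∧ Odd k ∧ q ≤ k) ∧
  (∀ m, Odd m → q ≤ m → (∃ d, Odd d ∧ 3 ≤ d ∧ d < q ∧ d ∣ m) →
    ∃ k w, D[k]? = some w ∧ k ≤ m ∧ ∃ p, w = 2*p ∧ p ∣ m)

lemma pvTrial_iff (c d : Int) (hd1 : 1 ≤ d) (hdo : Odd d) :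
    pvTrial c d = true ↔ ∀ e, Odd e → d ≤ e → e * e ≤ c → ¬ e ∣ c := by
  fun_induction pvTrial c d with
  | case1 d hle hm =>
    simp only [Bool.false_eq_true, false_iff]
    intro hall
    exact hall d hdo le_rfl hle ((PySem.Int.mod_eq_zero_iff_dvd c d).1 hm)
  | case2 d hle hm ih =>
    rw [ih (by omega) (by rcases hdo with ⟨k,hk⟩; exact ⟨k+1, by omega⟩)]
    constructor
    · intro hall e heo hde hec
      rcases eq_or_lt_of_le hde with heq | hlt
      · subst heq
        exact fun hdvd => hm ((PySem.Int.mod_eq_zero_iff_dvd c d).2 hdvd)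
      · have : d + 2 ≤ e := by
          rcases hdo with ⟨a,ha⟩; rcases heo with ⟨b,hb⟩; omega
        exact hall e heo this hec
    · intro hall e heo hde hec
      exact hall e heo (by omega) hec
  | case3 d hgt =>
    simp only [true_iff]
    intro e heo hde hec hdvd
    have : d * d ≤ e * e := mul_self_le_mul_self (by omega) hde
    omega

lemma pvIsPrimeOdd_false_iff (c : Int) (hc : 3 ≤ c) (hco : Odd c) :
    pvIsPrimeOdd c = false ↔ pvHasOddDiv c := by
  have h := pvTrial_iff c 3 (by omega) ⟨1, by ring⟩
  unfold pvIsPrimeOdd pvHasOddDiv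
  constructor
  · intro hf
    have hna : ¬ (∀ e, Odd e → 3 ≤ e → e * e ≤ c → ¬ e ∣ c) := by
      intro hall; rw [← h] at hall; simp [hall] at hf
    push Not at hna
    obtain ⟨e, heo, he3, hec, hed⟩ := hna
    exact ⟨e, heo, he3, by nlinarith, hed⟩
  · rintro ⟨d, hdo, hd3, hdc, hdvd⟩
    by_contra hb
    have ht : pvTrial c 3 = true := by
      cases hx : pvTrial c 3
      · exact absurd hx hb
      · rfl
    have hall := h.1 ht
    obtain ⟨t, hct⟩ := id hdvd
    have hto : Odd t := (Int.odd_mul.mp (hct ▸ hco)).2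
    have htpos : 1 ≤ t := by nlinarith
    have ht3 : 3 ≤ t := by
      rcases hto with ⟨k, hk⟩
      by_contra hlt
      have h1 : t = 1 := by omega
      subst h1; omega
    by_cases hdd : d * d ≤ c
    · exact hall d hdo hd3 hdd hdvd
    · have htt : t * t ≤ c := by nlinarith
      exact hall t hto ht3 htt ⟨d, by rw [hct]; ring⟩

lemma pv_prime_of_no_odd_div (q : Int) (hq : 3 ≤ q) (hqo : Odd q) (h : ¬ pvHasOddDiv q) :
    Nat.Prime q.toNat := by
  by_contra hnp
  set m := q.toNat.minFac with hm
  have hq1 : q.toNat ≠ 1 := by omega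
  have hmd : m ∣ q.toNat := Nat.minFac_dvd _
  have hmp : m.Prime := Nat.minFac_prime hq1
  have hsq : m * m ≤ q.toNat := by
    have := Nat.minFac_sq_le_self (by omega : 0 < q.toNat) hnp
    simpa [pow_two] using this
  have hmo : Odd m := by
    rcases hmp.eq_two_or_odd' with h2 | ho
    · exfalso
      rw [h2] at hmd
      rcases hqo with ⟨k, hk⟩
      obtain ⟨j, hj⟩ := hmd
      omega
    · exact ho
  have hm2 : 2 ≤ m := hmp.two_le
  have hm3 : 3 ≤ m := by rcases hmo with ⟨k, hk⟩; omega
  apply h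
  refine ⟨(m : Int), ?_, ?_, ?_, ?_⟩
  · rcases hmo with ⟨k, hk⟩; exact ⟨(k : Int), by exact_mod_cast hk⟩
  · exact_mod_cast hm3
  · have : m < q.toNat := by nlinarith
    omega
  · have : (m : Int) ∣ (q.toNat : Int) := Int.natCast_dvd_natCast.mpr hmd
    rwa [Int.toNat_of_nonneg (by omega)] at this

lemma pv_countP_lt {α : Type} (l : List α) (p q : α → Bool)
    (pq : ∀ a ∈ l, q a = true → p a = true) (a : α) (ha : a ∈ l)
    (hpa : p a = true) (hqa : q a = false) : l.countP q < l.countP p := by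
  induction l with
  | nil => simp at ha
  | cons b t ih =>
    rcases List.mem_cons.1 ha with rfl | hb
    · have h1 : t.countP q ≤ t.countP p := List.countP_mono_left (fun x hx => pq x (List.mem_cons_of_mem _ hx))
      simp [hpa, hqa]; omega
    · by_cases hqb : q b = true
      · have hpb : p b = true := pq b (List.mem_cons_self) hqb
        have := ih (fun x hx => pq x (List.mem_cons_of_mem _ hx)) hb
        simp [hpb, hqb]; omega
      · have := ih (fun x hx => pq x (List.mem_cons_of_mem _ hx)) hb
        simp [List.countP_cons, hqb]
        split_ifs <;> omega

-- membership bridge: contains ↔ some entry of toList has this key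
lemma pv_contains_iff_entry (D : Std.TreeMap Int Int compare) (k : Int) :
    D.contains k = true ↔ ∃ v, D[k]? = some v := by
  rw [Std.TreeMap.contains_eq_isSome_getElem?]
  exact Option.isSome_iff_exists

lemma pvSkip_spec (D : Std.TreeMap Int Int compare) (p : Int) (hp : 0 < p) :
    ∀ (f : Nat) (x : Int),
      (D.toList.countP (fun kv => decide (x ≤ kv.1 ∧ p ∣ (kv.1 - x)))) < f →
      (p ∣ pvSkip f D p x - x) ∧ x ≤ pvSkip f D p x ∧ D.contains (pvSkip f D p x) = false ∧
      (∀ y, x ≤ y → y < pvSkip f D p x → p ∣ y - x → D.contains y = true) := by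
  intro f
  induction f with
  | zero => intro x hx; omega
  | succ f ih =>
    intro x hx
    by_cases hcx : D.contains x = true
    · obtain ⟨v, hv⟩ := (pv_contains_iff_entry D x).mp hcx
      have haD : (x, v) ∈ D.toList := Std.TreeMap.mem_toList_iff_getElem?_eq_some.mpr hv
      have hcnt : (D.toList.countP (fun kv => decide ((x+p) ≤ kv.1 ∧ p ∣ (kv.1 - (x+p))))) < f := by
        have := pv_countP_lt D.toList
          (fun kv => decide (x ≤ kv.1 ∧ p ∣ (kv.1 - x)))
          (fun kv => decide ((x+p) ≤ kv.1 ∧ p ∣ (kv.1 - (x+p)))) ?_ (x, v) haD ?_ ?_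
        · omega
        · intro kv _ hq
          have hq' := of_decide_eq_true hq
          refine decide_eq_true ⟨by omega, ?_⟩
          have : kv.1 - x = (kv.1 - (x+p)) + p := by ring
          rw [this]; exact dvd_add hq'.2 dvd_rfl
        · exact decide_eq_true ⟨le_rfl, by simp⟩
        · refine decide_eq_false ?_
          rintro ⟨hle, -⟩; omega
      obtain ⟨ihd, ihle, ihc, ihall⟩ := ih (x + p) hcnt
      have hres : pvSkip (f+1) D p x = pvSkip f D p (x+p) := by
        simp [pvSkip, hcx]
      rw [hres]
      refine ⟨?_, by omega, ihc, ?_⟩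
      · have : pvSkip f D p (x+p) - x = (pvSkip f D p (x+p) - (x+p)) + p := by ring
        rw [this]; exact dvd_add ihd dvd_rfl
      · intro y hxy hyr hdy
        rcases eq_or_lt_of_le hxy with heq | hlt
        · rw [← heq]; exact hcx
        · have hyp : x + p ≤ y := by
            have := Int.le_of_dvd (by omega) hdy
            omega
          refine ihall y hyp hyr ?_
          have : y - (x+p) = (y - x) - p := by ring
          rw [this]; exact dvd_sub hdy dvd_rfl
    · have hcf : D.contains x = false := Bool.eq_false_iff.mpr hcx
      have hres : pvSkip (f+1) D p x = x := by simp [pvSkip, hcf]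
      rw [hres]
      exact ⟨by simp, le_rfl, hcf, fun y h1 h2 _ => by omega⟩

-- with the invariant, "q is a key of D" ↔ "q has a nontrivial odd divisor"
lemma pv_contains_iff (D : Std.TreeMap Int Int compare) (q : Int) (hI : pvInv D q) :
    D.contains q = true ↔ pvHasOddDiv q := by
  obtain ⟨hqo, hq3, h1, hcov⟩ := hI
  rw [pv_contains_iff_entry]
  constructor
  · rintro ⟨v, hv⟩
    obtain ⟨p, _, hpo, hp3, hpq, hpd, _, _⟩ := h1 q v hv
    exact ⟨p, hpo, hp3, hpq, hpd⟩
  · rintro ⟨d, hdo, hd3, hdq, hdvd⟩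
    obtain ⟨k, w, hkw, hle, _⟩ := hcov q hqo le_rfl ⟨d, hdo, hd3, hdq, hdvd⟩
    obtain ⟨p, _, _, _, _, _, _, hge⟩ := h1 k w hkw
    have : k = q := le_antisymm hle hge
    exact ⟨w, this ▸ hkw⟩

-- lookup through insert / erase, with plain equality tests on the keys
lemma pv_get_insert (D : Std.TreeMap Int Int compare) (k a : Int) (v : Int) :
    (D.insert k v)[a]? = if k = a then some v else D[a]? := by
  rw [Std.TreeMap.getElem?_insert]
  simp [Std.LawfulEqCmp.compare_eq_iff_eq]

lemma pv_get_erase (D : Std.TreeMap Int Int compare) (k a : Int) :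
    (D.erase k)[a]? = if k = a then none else D[a]? := by
  rw [Std.TreeMap.getElem?_erase]
  simp [Std.LawfulEqCmp.compare_eq_iff_eq]

-- p odd, 3 ≤ p < q, q.toNat prime ⇒ p does not divide q*q
lemma pv_not_dvd_sq (p q : Int) (hp3 : 3 ≤ p) (hpq : p < q) (hq3 : 3 ≤ q)
    (hprime : Nat.Prime q.toNat) (hdvd : p ∣ q * q) : False := by
  have hpn : (p.toNat : Int) = p := Int.toNat_of_nonneg (by omega)
  have hqn : (q.toNat : Int) = q := Int.toNat_of_nonneg (by omega)
  have hdn : p.toNat ∣ q.toNat * q.toNat := by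
    rw [← Int.natCast_dvd_natCast]
    push_cast [hpn, hqn]
    exact hdvd
  have hnotdvd : ¬ q.toNat ∣ p.toNat := by
    intro hd
    have := Nat.le_of_dvd (by omega) hd
    omega
  have hcop : (p.toNat).Coprime (q.toNat) :=
    ((Nat.Prime.coprime_iff_not_dvd hprime).mpr hnotdvd).symm
  have : p.toNat = 1 := (hcop.mul_right hcop).eq_one_of_dvd hdn
  omega

lemma pv_odd_dvd_two_mul (a b : Int) (h : Odd a) (h2 : a ∣ 2*b) : a ∣ b := by
  have hc : IsCoprime a 2 := by
    rw [Int.isCoprime_iff_gcd_eq_one]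
    rcases h with ⟨k, hk⟩
    subst hk; simp [Int.gcd]
  exact hc.dvd_of_dvd_mul_left h2

lemma pvInv_prime (D : Std.TreeMap Int Int compare) (q : Int) (hI : pvInv D q)
    (hq : D.contains q = false) : pvInv (D.insert (q*q) (2*q)) (q+2) := by
  have hIc := hI
  obtain ⟨hqo, hq3, h1, hcov⟩ := hIc
  have hgq : D[q]? = none := by
    cases hx : D[q]? with
    | none => rfl
    | some v =>
      exact absurd ((pv_contains_iff_entry D q).mpr ⟨v, hx⟩) (by simp [hq])
  have hnh : ¬ pvHasOddDiv q := by
    rw [← pv_contains_iff D q hI]; simp [hq]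
  have hprime : Nat.Prime q.toNat := pv_prime_of_no_odd_div q hq3 hqo hnh
  have hfresh : D[q*q]? = none := by
    cases hx : D[q*q]? with
    | none => rfl
    | some w =>
      obtain ⟨p, _, _, hp3, hpq, hpd, _, _⟩ := h1 (q*q) w hx
      exact absurd (pv_not_dvd_sq p q hp3 hpq hq3 hprime hpd) (by simp)
  refine ⟨⟨hqo.choose + 1, by have := hqo.choose_spec; omega⟩, by omega, ?_, ?_⟩
  · intro k w hkw
    rw [pv_get_insert] at hkw
    split_ifs at hkw with hk
    · subst hk
      have hw : w = 2*q := by injection hkw.symm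
      subst hw
      exact ⟨q, rfl, hqo, by omega, by omega, dvd_mul_left q q,
        Int.odd_mul.mpr ⟨hqo, hqo⟩, by nlinarith⟩
    · obtain ⟨p, hv, hpo, hp3, hpq, hpd, hko, hkge⟩ := h1 k w hkw
      have hne : k ≠ q := by
        intro h; subst h; rw [hgq] at hkw; simp at hkw
      refine ⟨p, hv, hpo, hp3, by omega, hpd, hko, ?_⟩
      rcases hko with ⟨a, ha⟩; rcases hqo with ⟨b, hb⟩; omega
  · intro m hmo hmge ⟨d, hdo, hd3, hdlt, hdvd⟩
    have hdq : d ≤ q := by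
      rcases hdo with ⟨a, ha⟩; rcases hqo with ⟨b, hb⟩; omega
    rcases lt_or_eq_of_le hdq with hlt | heq
    · obtain ⟨k, w, hkw, hle, hp⟩ := hcov m hmo (by omega) ⟨d, hdo, hd3, hlt, hdvd⟩
      have hne : q*q ≠ k := by
        intro h; rw [← h, hfresh] at hkw; simp at hkw
      exact ⟨k, w, by rw [pv_get_insert]; simp [hne, hkw], hle, hp⟩
    · subst heq
      obtain ⟨t, hmt⟩ := hdvd
      have hto : Odd t := (Int.odd_mul.mp (hmt ▸ hmo)).2
      have ht2 : 2 ≤ t := by nlinarith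
      have ht3 : 3 ≤ t := by rcases hto with ⟨a, ha⟩; omega
      rcases lt_or_ge t d with htd | htd
      · obtain ⟨k, w, hkw, hle, hp⟩ := hcov m hmo (by omega)
          ⟨t, hto, ht3, htd, ⟨d, by rw [hmt]; ring⟩⟩
        have hne : d*d ≠ k := by
          intro h; rw [← h, hfresh] at hkw; simp at hkw
        exact ⟨k, w, by rw [pv_get_insert]; simp [hne, hkw], hle, hp⟩
      · exact ⟨d*d, 2*d, by rw [pv_get_insert]; simp, by nlinarith, d, rfl, ⟨t, hmt⟩⟩

lemma pvInv_comp (D : Std.TreeMap Int Int compare) (q v : Int) (hI : pvInv D q)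
    (hget : D[q]? = some v) :
    pvInv ((D.erase q).insert (pvSkip ((D.erase q).size + 1) (D.erase q) v (v + q)) v) (q+2) := by
  obtain ⟨hqo, hq3, h1, hcov⟩ := hI
  obtain ⟨p', hv, hpo, hp3, hpq, hpd, -, -⟩ := h1 q v hget
  have hvpos : 0 < v := by omega
  set D1 := D.erase q with hD1
  have hD1get : ∀ a, D1[a]? = if q = a then none else D[a]? := fun a => pv_get_erase D q a
  have hfuel : (D1.toList.countP (fun kv => decide ((v+q) ≤ kv.1 ∧ v ∣ (kv.1 - (v+q))))) < D1.size + 1 := by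
    have := List.countP_le_length (p := fun kv : Int × Int => decide ((v+q) ≤ kv.1 ∧ v ∣ (kv.1 - (v+q)))) (l := D1.toList)
    rw [Std.TreeMap.length_toList] at this
    omega
  obtain ⟨hxd, hxge, hxc, hall⟩ := pvSkip_spec D1 v hvpos (D1.size + 1) (v + q) hfuel
  set x := pvSkip (D1.size + 1) D1 v (v + q) with hx
  have hxfresh : D1[x]? = none := by
    cases hx : D1[x]? with
    | none => rfl
    | some w =>
      exact absurd ((pv_contains_iff_entry D1 x).mpr ⟨w, hx⟩) (by simp [hxc])
  obtain ⟨k, hk⟩ := hxd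
  have hxqv : x = q + v * (k + 1) := by linarith [hk]
  have hk0 : 0 ≤ k := by nlinarith
  have hxodd : Odd x := by
    rcases hqo with ⟨a, ha⟩
    exact ⟨a + p' * (k+1), by rw [hxqv, hv]; ring_nf; omega⟩
  have hpx : p' ∣ x := by
    rw [hxqv]
    exact dvd_add hpd ⟨2*(k+1), by rw [hv]; ring⟩
  refine ⟨⟨hqo.choose + 1, by have := hqo.choose_spec; omega⟩, by omega, ?_, ?_⟩
  · intro a w haw
    rw [pv_get_insert] at haw
    split_ifs at haw with hax
    · subst hax
      have hw : w = v := by injection haw.symm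
      subst hw
      exact ⟨p', hv, hpo, hp3, by omega, hpx, hxodd, by omega⟩
    · rw [hD1get] at haw
      split_ifs at haw with haq
      obtain ⟨p, hv2, hpo2, hp32, hpq2, hpd2, hko, hkge⟩ := h1 a w haw
      refine ⟨p, hv2, hpo2, hp32, by omega, hpd2, hko, ?_⟩
      rcases hko with ⟨b, hb⟩; rcases hqo with ⟨c, hc⟩; omega
  · intro m hmo hmge hd
    have hred : ∃ d', Odd d' ∧ 3 ≤ d' ∧ d' < q ∧ d' ∣ m := by
      obtain ⟨d, hdo, hd3, hdlt, hdvd⟩ := hd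
      have hdq : d ≤ q := by
        rcases hdo with ⟨a, ha⟩; rcases hqo with ⟨b, hb⟩; omega
      rcases lt_or_eq_of_le hdq with hlt | heq
      · exact ⟨d, hdo, hd3, hlt, hdvd⟩
      · subst heq
        exact ⟨p', hpo, hp3, hpq, dvd_trans hpd hdvd⟩
    obtain ⟨a, w, haw, hle, p, hv2, hpm⟩ := hcov m hmo (by omega) hred
    by_cases haq : a = q
    · -- the popped entry covered m; its stored value is v, so p = p'
      subst haq
      have hwv : w = v := by
        rw [hget] at haw; injection haw with h; exact h.symm
      have hpp : p = p' := by rw [hwv, hv] at hv2; omega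
      subst hpp
      have hmq2 : (2:Int) ∣ (m - a) := by
        rcases hmo with ⟨b1, hb1⟩; rcases hqo with ⟨b2, hb2⟩
        exact ⟨b1 - b2, by omega⟩
      obtain ⟨b, hb⟩ := hmq2
      have hpb : p ∣ b := pv_odd_dvd_two_mul p b hpo (by
        have : 2*b = m - a := by omega
        rw [this]
        exact dvd_sub hpm hpd)
      have hvm : v ∣ (m - a) := by
        obtain ⟨e, he⟩ := hpb
        exact ⟨e, by rw [hb, he, hv]; ring⟩
      obtain ⟨j, hj⟩ := hvm
      have hj1 : 1 ≤ j := by nlinarith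
      rcases le_or_gt x m with hxm | hmx
      · exact ⟨x, v, by rw [pv_get_insert]; simp, hxm, p, by rw [hv], hpm⟩
      · have hmchain : D1.contains m = true := by
          apply hall m (by nlinarith) hmx
          exact ⟨j - 1, by linear_combination hj⟩
        obtain ⟨w', hw'⟩ := (pv_contains_iff_entry D1 m).mp hmchain
        have hmD : D[m]? = some w' := by
          rw [hD1get] at hw'
          split_ifs at hw' with h
          exact hw'
        obtain ⟨pk, hvk, -, -, -, hpkd, -, -⟩ := h1 m w' hmD
        have hmx' : x ≠ m := by omega
        exact ⟨m, w', by rw [pv_get_insert]; simp [hmx', hw'], le_rfl, pk, hvk, hpkd⟩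
    · have hqa : ¬ q = a := fun h => haq h.symm
      have haD1 : D1[a]? = some w := by rw [hD1get]; simp [hqa, haw]
      have hax : x ≠ a := by
        intro h; rw [h, haD1] at hxfresh; simp at hxfresh
      exact ⟨a, w, by rw [pv_get_insert]; simp [hax, haD1], hle, p, hv2, hpm⟩

lemma pv_loops_eq (n : Int) : ∀ (f : Nat) (psum count q : Int) (D : Std.TreeMap Int Int compare),
    pvInv D q → pvLoopA n f psum count D q = pvLoopB n f psum count q := by
  intro f
  induction f with
  | zero => intro psum count q D _; rfl
  | succ f ih =>
    intro psum count q D hI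
    have hq3 : 3 ≤ q := hI.2.1
    have hqo : Odd q := hI.1
    show (match D[q]? with
      | none =>
        if psum + q > n then count else pvLoopA n f (psum + q) (count+1) (D.insert (q*q) (2*q)) (q+2)
      | some p =>
        pvLoopA n f psum count ((D.erase q).insert (pvSkip ((D.erase q).size + 1) (D.erase q) p (p + q)) p) (q+2)) = _
    cases hget : D[q]? with
    | none =>
      have hc : D.contains q = false := by
        cases hx : D.contains q
        · rfl
        · obtain ⟨w, hw⟩ := (pv_contains_iff_entry D q).mp hx
          rw [hget] at hw; simp at hw
      have hnh : ¬ pvHasOddDiv q := by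
        rw [← pv_contains_iff D q hI]; simp [hc]
      have hprime : pvIsPrimeOdd q = true := by
        cases hx : pvIsPrimeOdd q
        · exact absurd ((pvIsPrimeOdd_false_iff q hq3 hqo).mp hx) hnh
        · rfl
      simp only [pvLoopB, hprime, if_true]
      by_cases hgt : psum + q > n
      · simp [hgt]
      · simp only [hgt, if_false]
        exact ih (psum+q) (count+1) (q+2) _ (pvInv_prime D q hI hc)
    | some v =>
      have hc : D.contains q = true := (pv_contains_iff_entry D q).mpr ⟨v, hget⟩
      have hhod : pvHasOddDiv q := (pv_contains_iff D q hI).mp hc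
      have hnp : pvIsPrimeOdd q = false := (pvIsPrimeOdd_false_iff q hq3 hqo).mpr hhod
      simp only [pvLoopB, hnp, if_false, Bool.false_eq_true]
      exact ih psum count (q+2) _ (pvInv_comp D q v hI hget)

lemma pvInv_init : pvInv ∅ 3 := by
  refine ⟨⟨1, by ring⟩, le_refl _, ?_, ?_⟩
  · intro k w hkw; simp at hkw
  · intro m _ _ ⟨d, hdo, hd3, hdq, _⟩; omega

-- ===== VERDICT =====
theorem primesthatsumto_spec : Claim_equal_primesthatsumto := by
  intro n _
  unfold Spec_primesthatsumto primesthatsumto primesthatsumto_alt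
  have h := pv_loops_eq n pvFuel (0+2) (0+1) 3 ∅ pvInv_init
  norm_num at h ⊢
  split_ifs <;> simp_all
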